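-- pv_equiv track=rewrite | github.com/kiloloop/oacp | scripts/send_inbox_message.py | _yaml_escape_scalar
-- ===== SOURCE A (Python) =====
-- _YAML_RESERVED_WORDS = frozenset({
--     "true", "false", "yes", "no", "on", "off", "null", "~",
--     "True", "False", "Yes", "No", "On", "Off", "Null", "NULL",
--     "TRUE", "FALSE", "YES", "NO", "ON", "OFF",
-- })
--
-- def _yaml_escape_scalar(value: str) -> str:
--     """Quote a scalar value if it contains YAML-special characters."""
--     if not value:
--         return '""'
--     # Newlines in scalar fields must be escaped
--     if "\n" in value:
--         escaped = value.replace("\\", "\\\\").replace('"', '\\"').replace("\n", "\\n")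
--         return f'"{escaped}"'
--     # YAML reserved bare words need quoting
--     if value in _YAML_RESERVED_WORDS:
--         return f'"{value}"'
--     # Quote if contains characters that need escaping
--     needs_quoting = any(
--         c in value for c in (":", "#", "{", "}", "[", "]", ",", "&", "*", "?", "|", ">", "'", '"', "%", "@", "`")
--     )
--     if needs_quoting or value.startswith(("-", " ")) or value != value.strip():
--         # Use double quotes with minimal escaping
--         escaped = value.replace("\\", "\\\\").replace('"', '\\"')
--         return f'"{escaped}"'
--     return value
-- ===== SOURCE B (Python) =====
-- _YAML_RESERVED_WORDS = frozenset({
--     "true", "false", "yes", "no", "on", "off", "null", "~",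
--     "True", "False", "Yes", "No", "On", "Off", "Null", "NULL",
--     "TRUE", "FALSE", "YES", "NO", "ON", "OFF",
-- })
--
-- # per-character escape table and the characters that force quoting (incl. newline)
-- _ESC = {"\\": "\\\\", '"': '\\"', "\n": "\\n"}
-- _SPECIAL = set(':#{}[],&*?|>\'"%@`\n')
--
--
-- def _yaml_escape_scalar(value: str) -> str:
--     """Quote a scalar value if it contains YAML-special characters."""
--     out = []
--     special = False
--     for c in value:
--         out.append(_ESC.get(c, c))
--         if c in _SPECIAL:
--             special = True
--     if (not value or special or value in _YAML_RESERVED_WORDS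
--             or value[0] == "-" or value[0].isspace() or value[-1].isspace()):
--         return '"' + "".join(out) + '"'
--     return value
-- ===== Notes on version B (the rewrite author's own statement) =====
-- stated objective: alternative
-- what changed: A decides and escapes by staged whole-string passes (17 per-special-character substring scans, chained replace passes, a strip comparison, four cascading early returns); B makes one fold over the characters that simultaneously builds the fully escaped output via a per-character escape table and a special-character flag, then decides quoting once from that flag, the reserved-word set and the first/last character's whitespace test, so B contains no replace, startswith or strip pass.
import Mathlib
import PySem

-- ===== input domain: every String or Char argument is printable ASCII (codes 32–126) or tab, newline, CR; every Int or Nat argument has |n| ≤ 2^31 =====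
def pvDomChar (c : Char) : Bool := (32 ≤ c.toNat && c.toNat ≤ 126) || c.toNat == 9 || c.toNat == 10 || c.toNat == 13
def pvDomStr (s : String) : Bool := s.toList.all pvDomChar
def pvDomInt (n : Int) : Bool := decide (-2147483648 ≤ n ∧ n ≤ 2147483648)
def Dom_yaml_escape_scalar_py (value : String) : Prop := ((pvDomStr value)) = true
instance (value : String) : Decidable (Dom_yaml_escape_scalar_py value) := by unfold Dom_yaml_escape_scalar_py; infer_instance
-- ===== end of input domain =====

-- B replaces A's cascade of staged whole-string replace() passes, 17 substring scans and a
-- strip() comparison by ONE fold over the characters that builds the escaped output and the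
-- special-character flag simultaneously, deciding via the first/last character; objective: alternative decomposition.

-- ===== PORT A =====
-- the frozenset of reserved bare words (membership test only, so list membership is exact)
def pvReservedA : List (List Char) :=
  ["true".toList, "false".toList, "yes".toList, "no".toList, "on".toList, "off".toList,
   "null".toList, "~".toList, "True".toList, "False".toList, "Yes".toList, "No".toList,
   "On".toList, "Off".toList, "Null".toList, "NULL".toList, "TRUE".toList, "FALSE".toList,
   "YES".toList, "NO".toList, "ON".toList, "OFF".toList]

-- the tuple of one-char strings A's generator iterates over
def pvSpecialsA : List Char :=
  [':', '#', '{', '}', '[', ']', ',', '&', '*', '?', '|', '>', '\'', '"', '%', '@', '`']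

-- value.replace("\\","\\\\").replace('"','\\"')
def pvEscA2 (v : List Char) : List Char :=
  PySem.Chars.replace (PySem.Chars.replace v ['\\'] ['\\', '\\']) ['"'] ['\\', '"']

-- literal transliteration of A on the char list (f'"{escaped}"' is '"' :: escaped ++ ['"'])
def yamlA (v : List Char) : List Char :=
  if v.isEmpty then ['"', '"']
  else if PySem.Chars.isIn ['\n'] v then
    '"' :: PySem.Chars.replace (pvEscA2 v) ['\n'] ['\\', 'n'] ++ ['"']
  else if pvReservedA.contains v then '"' :: v ++ ['"']
  else
    let needs_quoting := pvSpecialsA.any (fun c => PySem.Chars.isIn [c] v)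
    if needs_quoting || PySem.Chars.startswith v ['-'] || PySem.Chars.startswith v [' ']
        || !(v == PySem.Chars.strip v) then
      '"' :: pvEscA2 v ++ ['"']
    else v

def yaml_escape_scalar_py (value : String) : String := String.ofList (yamlA value.toList)

-- ===== PORT B =====
-- Source B carries the same reserved-word constant; the shared pvReservedA list stands for it

-- _ESC = {'\\': '\\\\', '"': '\\"', '\n': '\\n'}
def pvEscD : PySem.Dict Char (List Char) :=
  PySem.Dict.ofList [('\\', ['\\', '\\']), ('"', ['\\', '"']), ('\n', ['\\', 'n'])]

-- set(':#{}[],&*?|>\'"%@`\n')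
def pvSpecialB : PySem.Set Char :=
  PySem.Set.ofList
    [':', '#', '{', '}', '[', ']', ',', '&', '*', '?', '|', '>', '\'', '"', '%', '@', '`', '\n']

-- literal transliteration of B: one fold building (out, special), then one decision.
-- value[0] / value[-1] are guarded in Source B by the 'not value' disjunct, so headI / getLastD
-- defaults are never the deciding value on the admitted (nonempty) path.
def yamlB (v : List Char) : List Char :=
  let st := v.foldl
    (fun (st : List Char × Bool) c =>
      (st.1 ++ PySem.Dict.getD pvEscD c [c], st.2 || PySem.Set.contains pvSpecialB c))
    ([], false)
  if v.isEmpty || st.2 || pvReservedA.contains v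
      || (v.headI == '-') || PySem.Chars.isspace v.headI
      || PySem.Chars.isspace (v.getLastD ' ') then
    '"' :: st.1 ++ ['"']
  else v

def yaml_escape_scalar_py_alt (value : String) : String := String.ofList (yamlB value.toList)

-- ===== PRECONDITION & SPEC =====
def Spec_yaml_escape_scalar_py (value : String) (out : String) : Prop := out = yaml_escape_scalar_py_alt value
instance (value : String) (out : String) : Decidable (Spec_yaml_escape_scalar_py value out) := by unfold Spec_yaml_escape_scalar_py; infer_instance

-- ===== CLAIM (what is proved, stated in full; the proofs are below) =====
def Claim_equal_yaml_escape_scalar_py : Prop := ∀ (value : String), Dom_yaml_escape_scalar_py value → Spec_yaml_escape_scalar_py value (yaml_escape_scalar_py value)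

-- ===== LEMMAS AND PROOFS =====

-- B's per-character escape function
def escF (c : Char) : List Char := PySem.Dict.getD pvEscD c [c]

-- the fold computes (flatMap escF, any special)
lemma fold_char (v : List Char) : ∀ (acc : List Char) (b : Bool),
    v.foldl (fun (st : List Char × Bool) c =>
        (st.1 ++ PySem.Dict.getD pvEscD c [c], st.2 || PySem.Set.contains pvSpecialB c))
      (acc, b)
      = (acc ++ v.flatMap escF, b || v.any (fun c => PySem.Set.contains pvSpecialB c)) := by
  induction v with
  | nil => intro acc b; simp
  | cons c t ih =>
    intro acc b
    simp only [List.foldl_cons, ih, List.flatMap_cons, List.any_cons, escF]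
    simp [Bool.or_assoc]

-- replace with a single-char pattern is a flatMap
lemma replace_go_flatMap (a : Char) (new : List Char) :
    ∀ (fuel : Nat) (l acc : List Char), l.length ≤ fuel →
      PySem.Chars.replace.go [a] new fuel l acc
        = acc.reverse ++ l.flatMap (fun c => if a == c then new else [c]) := by
  intro fuel
  induction fuel with
  | zero =>
    intro l acc h
    have : l = [] := List.length_eq_zero_iff.mp (Nat.le_zero.mp h)
    subst this; simp [PySem.Chars.replace.go]
  | succ n ih =>
    intro l acc h
    cases l with
    | nil => simp [PySem.Chars.replace.go]
    | cons c t =>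
      have ht : t.length ≤ n := by simpa using h
      by_cases hc : (a == c) = true
      · have hp : List.isPrefixOf [a] (c :: t) = true := by
          simp [List.isPrefixOf, hc]
        simp only [PySem.Chars.replace.go, hp, if_pos]
        rw [ih (List.drop [a].length (c :: t)) (new.reverse ++ acc) (by simpa using ht)]
        have hac : a = c := by simpa using hc
        simp [hac]
      · have hp : List.isPrefixOf [a] (c :: t) = false := by
          simp only [List.isPrefixOf]
          simp [hc]
        simp only [PySem.Chars.replace.go, hp, Bool.false_eq_true, if_neg, not_false_eq_true]
        rw [ih t (c :: acc) ht]
        have hac : a ≠ c := by simpa using hc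
        simp [hac]

lemma replace_single (a : Char) (new v : List Char) :
    PySem.Chars.replace v [a] new = v.flatMap (fun c => if a == c then new else [c]) := by
  simp only [PySem.Chars.replace, List.isEmpty_cons, Bool.false_eq_true, if_neg,
    not_false_eq_true]
  rw [replace_go_flatMap a new v.length v [] le_rfl]
  simp

-- the three staged replaces of A's newline branch are B's single per-char escape pass
lemma esc3_eq_flatMap (v : List Char) :
    PySem.Chars.replace (pvEscA2 v) ['\n'] ['\\', 'n'] = v.flatMap escF := by
  unfold pvEscA2
  rw [replace_single, replace_single, replace_single, List.flatMap_assoc,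
    List.flatMap_assoc]
  apply List.flatMap_congr
  intro c _
  by_cases h1 : c = '\\'
  · subst h1; decide
  by_cases h2 : c = '"'
  · subst h2; decide
  by_cases h3 : c = '\n'
  · subst h3; decide
  have b1 : ('\\' == c) = false := by simp; exact fun e => h1 e.symm
  have b2 : ('"' == c) = false := by simp; exact fun e => h2 e.symm
  have b3 : ('\n' == c) = false := by simp; exact fun e => h3 e.symm
  simp only [b1, b2, b3, if_neg, Bool.false_eq_true, not_false_eq_true,
    List.flatMap_cons, List.flatMap_nil, List.append_nil, escF]
  show [c] = PySem.Dict.getD pvEscD c [c]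
  have : pvEscD = PySem.Dict.mk [('\\', ['\\', '\\']), ('"', ['\\', '"']), ('\n', ['\\', 'n'])] := by
    decide
  rw [this]
  simp [PySem.Dict.getD, PySem.Dict.get?, b1, b2, b3]

-- A's two-stage escape (no-newline branch) is also the per-char pass when '\n' ∉ v
lemma esc2_eq_flatMap {v : List Char} (h : '\n' ∉ v) :
    pvEscA2 v = v.flatMap escF := by
  rw [← esc3_eq_flatMap, replace_single]
  have : ∀ c ∈ pvEscA2 v, (if '\n' == c then ['\\', 'n'] else [c]) = [c] := by
    intro c hc
    have hcn : c ≠ '\n' := by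
      rintro rfl
      -- '\n' survives both replaces only if it was in v
      unfold pvEscA2 at hc
      rw [replace_single, replace_single] at hc
      simp only [List.mem_flatMap] at hc
      obtain ⟨b, hb, hmb⟩ := hc
      obtain ⟨a, ha, hma⟩ := hb
      split_ifs at hma with h1
      · -- b is one of the two backslashes; then hmb is decidably false
        simp only [List.mem_cons, List.not_mem_nil, or_false] at hma
        rcases hma with rfl | rfl <;> exact absurd hmb (by decide)
      · simp only [List.mem_cons, List.not_mem_nil, or_false] at hma
        subst hma
        split_ifs at hmb with h2
        · exact absurd hmb (by decide)
        · simp only [List.mem_cons, List.not_mem_nil, or_false] at hmb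
          subst hmb; exact h ha
    simp [show ('\n' == c) = false by simpa using fun e => hcn e.symm]
  calc pvEscA2 v = (pvEscA2 v).flatMap (fun c => [c]) := by simp
    _ = (pvEscA2 v).flatMap (fun c => if '\n' == c then ['\\', 'n'] else [c]) :=
        (List.flatMap_congr (fun c hc => (this c hc).symm))

-- 'c in v' for a one-char substring is list membership
lemma isIn_singleton (c : Char) (v : List Char) :
    PySem.Chars.isIn [c] v = v.contains c := by
  by_cases h : c ∈ v
  · have : [c] <:+: v := by
      rcases List.mem_iff_append.mp h with ⟨s, t, rfl⟩
      exact ⟨s, t, by simp⟩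
    simp [(PySem.Chars.isIn_iff_infix [c] v).mpr this, h]
  · have : ¬ [c] <:+: v := fun hi => h (hi.subset List.mem_cons_self)
    simp [(PySem.Chars.isIn_eq_false_iff [c] v).mpr this, h]

-- B's one-pass membership flag agrees with A's per-character scan when there is no newline
lemma any_eq {v : List Char} (h : '\n' ∉ v) :
    pvSpecialsA.any (fun c => PySem.Chars.isIn [c] v)
      = v.any (fun c => PySem.Set.contains pvSpecialB c) := by
  rw [Bool.eq_iff_iff]
  simp only [List.any_eq_true, isIn_singleton, List.contains_iff_mem]
  constructor
  · rintro ⟨c, hc, hv⟩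
    refine ⟨c, hv, ?_⟩
    have : c ∈ ([':', '#', '{', '}', '[', ']', ',', '&', '*', '?', '|', '>', '\'', '"', '%',
        '@', '`', '\n'] : List Char) := by
      simp only [pvSpecialsA, List.mem_cons, List.not_mem_nil, or_false] at hc
      rcases hc with rfl|rfl|rfl|rfl|rfl|rfl|rfl|rfl|rfl|rfl|rfl|rfl|rfl|rfl|rfl|rfl|rfl <;> decide
    simpa [pvSpecialB, PySem.Set.contains, PySem.Set.mem_ofList] using this
  · rintro ⟨c, hv, hc⟩
    refine ⟨c, ?_, hv⟩
    have hc' : c ∈ ([':', '#', '{', '}', '[', ']', ',', '&', '*', '?', '|', '>', '\'', '"', '%',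
        '@', '`', '\n'] : List Char) := by
      simpa [pvSpecialB, PySem.Set.contains, PySem.Set.mem_ofList] using hc
    have hcn : c ≠ '\n' := fun e => h (e ▸ hv)
    simp only [List.mem_cons, List.not_mem_nil, or_false] at hc'
    rcases hc' with rfl|rfl|rfl|rfl|rfl|rfl|rfl|rfl|rfl|rfl|rfl|rfl|rfl|rfl|rfl|rfl|rfl|rfl
    · decide
    all_goals first | decide | exact absurd rfl hcn

-- strip changes a nonempty string iff its first or last character is whitespace
lemma length_rstrip_le (v : List Char) :
    (PySem.Chars.rstrip v).length ≤ v.length := by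
  unfold PySem.Chars.rstrip
  calc (List.dropWhile PySem.Chars.isspace v.reverse).reverse.length
      = (List.dropWhile PySem.Chars.isspace v.reverse).length := List.length_reverse
    _ ≤ v.reverse.length := List.length_dropWhile_le _ _
    _ = v.length := List.length_reverse

lemma strip_ne_iff (c : Char) (t : List Char) :
    ((c :: t == PySem.Chars.strip (c :: t)) = false)
      ↔ (PySem.Chars.isspace c || PySem.Chars.isspace ((c :: t).getLastD ' ')) = true := by
  obtain ⟨h, rt, hrev⟩ : ∃ h rt, (c :: t).reverse = h :: rt := by
    cases hr : (c :: t).reverse with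
    | nil => simp at hr
    | cons h rt => exact ⟨h, rt, rfl⟩
  have hlast : (c :: t).getLastD ' ' = h := by
    rw [List.getLastD_eq_getLast?, ← List.head?_reverse, hrev]; rfl
  rw [beq_eq_false_iff_ne, hlast, Bool.or_eq_true]
  constructor
  · -- if neither end is whitespace, strip is the identity
    intro hne
    by_contra hcon
    rw [not_or] at hcon
    obtain ⟨hc, hh⟩ := hcon
    apply hne
    have hl : PySem.Chars.lstrip (c :: t) = c :: t := by
      unfold PySem.Chars.lstrip
      exact List.dropWhile_cons_of_neg hc
    unfold PySem.Chars.strip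
    rw [hl]
    unfold PySem.Chars.rstrip
    rw [hrev, List.dropWhile_cons_of_neg hh, ← hrev, List.reverse_reverse]
  · -- a whitespace end makes strip strictly shorter
    rintro (hc | hh)
    · have h1 : (PySem.Chars.lstrip (c :: t)).length ≤ t.length := by
        unfold PySem.Chars.lstrip
        rw [List.dropWhile_cons_of_pos hc]
        exact List.length_dropWhile_le _ _
      have h2 : (PySem.Chars.strip (c :: t)).length < (c :: t).length := by
        unfold PySem.Chars.strip
        calc (PySem.Chars.rstrip (PySem.Chars.lstrip (c :: t))).length
            ≤ (PySem.Chars.lstrip (c :: t)).length := length_rstrip_le _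
          _ ≤ t.length := h1
          _ < (c :: t).length := by simp
      intro he; rw [← he] at h2; omega
    · by_cases hc : PySem.Chars.isspace c = true
      · have h1 : (PySem.Chars.lstrip (c :: t)).length ≤ t.length := by
          unfold PySem.Chars.lstrip
          rw [List.dropWhile_cons_of_pos hc]
          exact List.length_dropWhile_le _ _
        have h2 : (PySem.Chars.strip (c :: t)).length < (c :: t).length := by
          unfold PySem.Chars.strip
          calc (PySem.Chars.rstrip (PySem.Chars.lstrip (c :: t))).length
              ≤ (PySem.Chars.lstrip (c :: t)).length := length_rstrip_le _
            _ ≤ t.length := h1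
            _ < (c :: t).length := by simp
        intro he; rw [← he] at h2; omega
      · have hl : PySem.Chars.lstrip (c :: t) = c :: t := by
          unfold PySem.Chars.lstrip
          exact List.dropWhile_cons_of_neg hc
        have h2 : (PySem.Chars.strip (c :: t)).length < (c :: t).length := by
          unfold PySem.Chars.strip
          rw [hl]
          unfold PySem.Chars.rstrip
          rw [hrev, List.dropWhile_cons_of_pos hh]
          have : (List.dropWhile PySem.Chars.isspace rt).length ≤ rt.length :=
            List.length_dropWhile_le _ _
          have hlen : (c :: t).length = rt.length + 1 := by
            have := congrArg List.length hrev; simpa using this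
          simp only [List.length_reverse]
          omega
        intro he; rw [← he] at h2; omega

lemma startswith_head (c : Char) (t : List Char) (a : Char) :
    PySem.Chars.startswith (c :: t) [a] = (c == a) := by
  rw [Bool.eq_iff_iff, PySem.Chars.startswith_iff, List.cons_prefix_cons]
  constructor
  · rintro ⟨rfl, -⟩; simp
  · intro hca; exact ⟨(beq_iff_eq.mp hca).symm, List.nil_prefix⟩

lemma yaml_eq (v : List Char) : yamlA v = yamlB v := by
  cases v with
  | nil => decide
  | cons c t =>
    have hfold := fold_char (c :: t) [] false
    simp only [yamlA, yamlB, hfold, List.nil_append, Bool.false_or, List.isEmpty_cons,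
      Bool.false_eq_true, if_false]
    by_cases hNl : '\n' ∈ c :: t
    · have hIn : PySem.Chars.isIn ['\n'] (c :: t) = true := by
        simp [isIn_singleton, hNl]
      have hAny : ((c :: t).any fun x => PySem.Set.contains pvSpecialB x) = true := by
        simp only [List.any_eq_true]
        exact ⟨'\n', hNl, by decide⟩
      rw [if_pos hIn, hAny]
      simp [esc3_eq_flatMap]
    · have hIn : PySem.Chars.isIn ['\n'] (c :: t) = false := by
        simp [isIn_singleton, hNl]
      rw [hIn]
      simp only [Bool.false_eq_true, if_false]
      by_cases hR : pvReservedA.contains (c :: t) = true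
      · rw [if_pos hR]
        have hm : c :: t ∈ pvReservedA := by simpa using hR
        have hesc : (c :: t).flatMap escF = c :: t := by
          simp only [pvReservedA, List.mem_cons, List.not_mem_nil, or_false] at hm
          rcases hm with h|h|h|h|h|h|h|h|h|h|h|h|h|h|h|h|h|h|h|h|h|h <;> rw [h] <;> decide
        rw [hR]
        simp [hesc]
      · rw [if_neg hR]
        have hRB : pvReservedA.contains (c :: t) = false := by simpa using hR
        rw [hRB]
        have hsw1 : PySem.Chars.startswith (c :: t) ['-'] = (c == '-') := startswith_head c t '-'
        have hsw2 : PySem.Chars.startswith (c :: t) [' '] = (c == ' ') := startswith_head c t ' '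
        have hspace : (c == ' ') = true → PySem.Chars.isspace c = true := by
          intro h
          have hce : c = ' ' := by simpa using h
          subst hce; decide
        have hstrip' : (!(c :: t == PySem.Chars.strip (c :: t))) = true
            ↔ (PySem.Chars.isspace c = true
                ∨ PySem.Chars.isspace ((c :: t).getLastD ' ') = true) := by
          rw [Bool.not_eq_true', strip_ne_iff, Bool.or_eq_true]
        have hany := any_eq hNl
        have hcond :
            ((pvSpecialsA.any fun x => PySem.Chars.isIn [x] (c :: t))
                || PySem.Chars.startswith (c :: t) ['-'] || PySem.Chars.startswith (c :: t) [' ']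
                || !(c :: t == PySem.Chars.strip (c :: t)))
              = (((c :: t).any fun x => PySem.Set.contains pvSpecialB x) || false
                || ((c :: t).headI == '-') || PySem.Chars.isspace (c :: t).headI
                || PySem.Chars.isspace ((c :: t).getLastD ' ')) := by
          rw [hany, hsw1, hsw2, Bool.eq_iff_iff]
          simp only [Bool.or_eq_true, Bool.or_false, List.headI_cons, hstrip']
          constructor
          · rintro (((hA | hB) | hC) | (hD | hD))
            · exact Or.inl (Or.inl (Or.inl hA))
            · exact Or.inl (Or.inl (Or.inr hB))
            · exact Or.inl (Or.inr (hspace hC))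
            · exact Or.inl (Or.inr hD)
            · exact Or.inr hD
          · rintro (((hA | hB) | hC) | hD)
            · exact Or.inl (Or.inl (Or.inl hA))
            · exact Or.inl (Or.inl (Or.inr hB))
            · exact Or.inr (Or.inl hC)
            · exact Or.inr (Or.inr hD)
        rw [hcond]
        split_ifs with hB
        · simp [esc2_eq_flatMap hNl]
        · rfl

-- ===== VERDICT (by name: the statement is the Claim_ definition above) =====
theorem yaml_escape_scalar_py_spec : Claim_equal_yaml_escape_scalar_py := by
  intro value _
  unfold Spec_yaml_escape_scalar_py yaml_escape_scalar_py yaml_escape_scalar_py_alt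
  rw [yaml_eq]
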